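-- pv_equiv track=rewrite | github.com/wang1365/social-auto-upload | myUtils/youtube_downloader.py | pick_best_subtitle_language
-- ===== SOURCE A (Python) =====
-- def pick_best_subtitle_language(available_languages: list[str]) -> str | None:
--     if not available_languages:
--         return None
--     normalized = [lang for lang in available_languages if lang and lang != "live_chat"]
--     if not normalized:
--         return None
--
--     preferred_exact = ["zh-Hans", "zh-CN", "zh", "en-US", "en-GB", "en"]
--     for candidate in preferred_exact:
--         if candidate in normalized:
--             return candidate
--     for candidate in normalized:
--         if candidate.lower().startswith("zh"):
--             return candidate
--     for candidate in normalized: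
--         if candidate.lower().startswith("en"):
--             return candidate
--     return normalized[0]
-- ===== SOURCE B (Python) =====
-- def _rank(lang):
--     preferred_exact = ("zh-Hans", "zh-CN", "zh", "en-US", "en-GB", "en")
--     for i, candidate in enumerate(preferred_exact):
--         if lang == candidate:
--             return i
--     low = lang.lower()
--     if low.startswith("zh"):
--         return 6
--     if low.startswith("en"):
--         return 7
--     return 8
--
--
-- def pick_best_subtitle_language(available_languages):
--     best = None
--     best_rank = 9
--     for lang in available_languages:
--         if not lang or lang == "live_chat":
--             continue
--         r = _rank(lang)
--         if r < best_rank: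
--             best, best_rank = lang, r
--     return best
-- ===== Notes on version B (the rewrite author's own statement) =====
-- stated objective: alternative
-- what changed: Replaces the four sequential scans (six exact-membership probes, a zh-prefix scan, an en-prefix scan, then head) by a single left-to-right pass that keeps the first element of minimal priority rank, with no intermediate normalized list.
import Mathlib
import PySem

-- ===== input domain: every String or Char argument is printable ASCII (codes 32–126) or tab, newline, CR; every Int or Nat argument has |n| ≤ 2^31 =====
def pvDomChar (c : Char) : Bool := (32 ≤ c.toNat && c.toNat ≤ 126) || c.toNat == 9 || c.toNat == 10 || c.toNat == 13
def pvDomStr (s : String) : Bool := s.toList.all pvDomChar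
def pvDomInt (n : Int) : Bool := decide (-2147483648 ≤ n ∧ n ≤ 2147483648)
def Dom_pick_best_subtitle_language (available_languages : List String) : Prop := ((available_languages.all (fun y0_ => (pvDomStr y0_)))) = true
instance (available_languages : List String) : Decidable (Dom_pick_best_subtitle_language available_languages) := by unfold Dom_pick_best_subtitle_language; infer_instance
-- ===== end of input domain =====

-- B replaces A's four sequential scans by one pass keeping the first element of minimal
-- priority rank (alternative decomposition, same asymptotic cost).

-- ===== PORT A =====
-- shared tiny predicates: `lang and lang != "live_chat"`, `x.lower().startswith("zh"/"en")`
def pbsl_keep (lang : String) : Bool := !(lang == "") && !(lang == "live_chat")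
def pbsl_zh (s : String) : Bool := PySem.Str.startswith (PySem.Str.lower s) "zh"
def pbsl_en (s : String) : Bool := PySem.Str.startswith (PySem.Str.lower s) "en"

-- `for candidate in preferred_exact: if candidate in normalized: return candidate`
def pbsl_exactLoop (normalized : List String) : List String → Option String
  | [] => none
  | c :: rest => if normalized.contains c then some c else pbsl_exactLoop normalized rest

def pick_best_subtitle_language (available_languages : List String) : Option String :=
  if available_languages.isEmpty then none else
  let normalized := available_languages.filter pbsl_keep
  if normalized.isEmpty then none else
  let preferred_exact : List String := ["zh-Hans", "zh-CN", "zh", "en-US", "en-GB", "en"]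
  match pbsl_exactLoop normalized preferred_exact with
  | some c => some c
  | none =>
    match normalized.find? pbsl_zh with
    | some c => some c
    | none =>
      match normalized.find? pbsl_en with
      | some c => some c
      | none => PySem.List.pyGet? normalized 0

-- ===== PORT B =====
-- `for i, candidate in enumerate(preferred_exact): if lang == candidate: return i`
def pbsl_rankExact : List String → Nat → String → Option Nat
  | [], _, _ => none
  | c :: rest, i, lang => if lang == c then some i else pbsl_rankExact rest (i + 1) lang

def pbsl_rank (lang : String) : Nat :=
  match pbsl_rankExact ["zh-Hans", "zh-CN", "zh", "en-US", "en-GB", "en"] 0 lang with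
  | some i => i
  | none => if pbsl_zh lang then 6 else if pbsl_en lang then 7 else 8

def pick_best_subtitle_language_alt (available_languages : List String) : Option String :=
  (available_languages.foldl
    (fun (acc : Option String × Nat) lang =>
      if pbsl_keep lang then
        if pbsl_rank lang < acc.2 then (some lang, pbsl_rank lang) else acc
      else acc)
    (none, 9)).1

-- ===== PRECONDITION & SPEC =====
def Spec_pick_best_subtitle_language (available_languages : List String) (out : Option String) : Prop := out = pick_best_subtitle_language_alt available_languages
instance (available_languages : List String) (out : Option String) : Decidable (Spec_pick_best_subtitle_language available_languages out) := by unfold Spec_pick_best_subtitle_language; infer_instance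

-- ===== CLAIM (what is proved, stated in full; the proofs are below) =====
def Claim_equal_pick_best_subtitle_language : Prop := ∀ (available_languages : List String), Dom_pick_best_subtitle_language available_languages → Spec_pick_best_subtitle_language available_languages (pick_best_subtitle_language available_languages)

-- ===== LEMMAS AND PROOFS =====

-- B's loop body without the keep-filter
def pbsl_step (acc : Option String × Nat) (lang : String) : Option String × Nat :=
  if pbsl_rank lang < acc.2 then (some lang, pbsl_rank lang) else acc

-- first element of minimal rank in x :: t
def pbsl_best (x : String) : List String → String
  | [] => x
  | y :: t => if pbsl_rank y < pbsl_rank x then pbsl_best y t else pbsl_best x t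

theorem pbsl_fold_filter (xs : List String) (acc : Option String × Nat) :
    xs.foldl
      (fun (acc : Option String × Nat) lang =>
        if pbsl_keep lang then
          if pbsl_rank lang < acc.2 then (some lang, pbsl_rank lang) else acc
        else acc)
      acc = (xs.filter pbsl_keep).foldl pbsl_step acc := by
  induction xs generalizing acc with
  | nil => rfl
  | cons x t ih =>
    by_cases h : pbsl_keep x <;> simp [List.foldl_cons, h, pbsl_step, ih]

theorem pbsl_fold_best (t : List String) : ∀ x : String,
    t.foldl pbsl_step (some x, pbsl_rank x) = (some (pbsl_best x t), pbsl_rank (pbsl_best x t)) := by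
  induction t with
  | nil => intro x; rfl
  | cons y t ih =>
    intro x
    by_cases h : pbsl_rank y < pbsl_rank x <;>
      simp [List.foldl_cons, pbsl_step, pbsl_best, h, ih]

theorem pbsl_best_min (t : List String) : ∀ x, ∀ y ∈ x :: t, pbsl_rank (pbsl_best x t) ≤ pbsl_rank y := by
  induction t with
  | nil => intro x y hy; simp at hy; simp [hy, pbsl_best]
  | cons z t ih =>
    intro x y hy
    simp only [List.mem_cons] at hy
    by_cases h : pbsl_rank z < pbsl_rank x
    · simp only [pbsl_best, if_pos h]
      rcases hy with rfl | rfl | hy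
      · exact le_trans (ih z z (by simp)) (le_of_lt h)
      · exact ih y y (by simp)
      · exact ih z y (by simp [hy])
    · simp only [pbsl_best, if_neg h]
      rcases hy with rfl | rfl | hy
      · exact ih y y (by simp)
      · exact le_trans (ih x x (by simp)) (le_of_not_gt h)
      · exact ih x y (by simp [hy])

theorem pbsl_best_decomp (t : List String) : ∀ x, ∃ l₁ l₂,
    x :: t = l₁ ++ pbsl_best x t :: l₂ ∧ ∀ y ∈ l₁, pbsl_rank (pbsl_best x t) < pbsl_rank y := by
  induction t with
  | nil => intro x; exact ⟨[], [], by simp [pbsl_best], by simp⟩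
  | cons z t ih =>
    intro x
    by_cases h : pbsl_rank z < pbsl_rank x
    · obtain ⟨l₁, l₂, hdec, hmin⟩ := ih z
      have hb : pbsl_best x (z :: t) = pbsl_best z t := by simp [pbsl_best, h]
      refine ⟨x :: l₁, l₂, ?_, ?_⟩
      · rw [hb, List.cons_append, ← hdec]
      · intro y hy
        rw [hb]
        rcases List.mem_cons.mp hy with rfl | hy
        · exact lt_of_le_of_lt (pbsl_best_min t z z (by simp)) h
        · exact hmin y hy
    · obtain ⟨l₁, l₂, hdec, hmin⟩ := ih x
      have hb : pbsl_best x (z :: t) = pbsl_best x t := by simp [pbsl_best, h]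
      rcases l₁ with _ | ⟨w, l₁'⟩
      · simp only [List.nil_append, List.cons.injEq] at hdec
        refine ⟨[], z :: t, ?_, by simp⟩
        have hbx : pbsl_best x t = x := hdec.1.symm
        rw [hb, hbx, List.nil_append]
      · simp only [List.cons_append, List.cons.injEq] at hdec
        obtain ⟨rfl, hdec2⟩ := hdec
        refine ⟨x :: z :: l₁', l₂, ?_, ?_⟩
        · rw [hb, List.cons_append, List.cons_append, ← hdec2]
        · intro y hy
          rw [hb]
          have hx : pbsl_rank (pbsl_best x t) < pbsl_rank x := hmin x (by simp)
          rcases List.mem_cons.mp hy with rfl | hy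
          · exact hx
          · rcases List.mem_cons.mp hy with rfl | hy
            · exact lt_of_lt_of_le hx (le_of_not_gt h)
            · exact hmin y (by simp [hy])

theorem pbsl_rank_cases (s : String) :
    (pbsl_rank s = 0 ∧ s = "zh-Hans") ∨ (pbsl_rank s = 1 ∧ s = "zh-CN") ∨
    (pbsl_rank s = 2 ∧ s = "zh") ∨ (pbsl_rank s = 3 ∧ s = "en-US") ∨
    (pbsl_rank s = 4 ∧ s = "en-GB") ∨ (pbsl_rank s = 5 ∧ s = "en") ∨
    (pbsl_rank s = 6 ∧ pbsl_zh s = true) ∨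
    (pbsl_rank s = 7 ∧ pbsl_zh s = false ∧ pbsl_en s = true) ∨
    (pbsl_rank s = 8 ∧ pbsl_zh s = false ∧ pbsl_en s = false) := by
  unfold pbsl_rank
  simp only [pbsl_rankExact]
  split_ifs with h1 h2 h3 h4 h5 h6 h7 h8 <;> simp_all

theorem pbsl_rank_le_8 (s : String) : pbsl_rank s ≤ 8 := by
  rcases pbsl_rank_cases s with ⟨h,-⟩|⟨h,-⟩|⟨h,-⟩|⟨h,-⟩|⟨h,-⟩|⟨h,-⟩|⟨h,-⟩|⟨h,-⟩|⟨h,-⟩ <;> omega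

theorem pbsl_zh_rank {s : String} (h : pbsl_zh s = true) : pbsl_rank s ≤ 6 := by
  rcases pbsl_rank_cases s with ⟨h1,-⟩|⟨h1,-⟩|⟨h1,-⟩|⟨h1,-⟩|⟨h1,-⟩|⟨h1,-⟩|⟨h1,-⟩|⟨h1,hz,-⟩|⟨h1,hz,-⟩ <;>
    first | omega | (rw [h] at hz; cases hz)

theorem pbsl_en_rank {s : String} (h : pbsl_en s = true) : pbsl_rank s ≤ 7 := by
  rcases pbsl_rank_cases s with ⟨h1,-⟩|⟨h1,-⟩|⟨h1,-⟩|⟨h1,-⟩|⟨h1,-⟩|⟨h1,-⟩|⟨h1,-⟩|⟨h1,-,-⟩|⟨h1,-,he⟩ <;>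
    first | omega | (rw [h] at he; cases he)

theorem pbsl_not_contains {N : List String} {b : String}
    (hmin : ∀ y ∈ N, pbsl_rank b ≤ pbsl_rank y) {c : String}
    (hc : pbsl_rank c < pbsl_rank b) : N.contains c = false := by
  cases h : N.contains c with
  | false => rfl
  | true => exact absurd (hmin c (by simpa using h)) (by omega)

theorem pbsl_mem_contains {N : List String} {c : String} (h : c ∈ N) : N.contains c = true := by
  simpa using h

theorem pbsl_find?_first {p : String → Bool} (b : String) (l₂ : List String) :
    ∀ l₁ : List String, (∀ y ∈ l₁, p y = false) → p b = true →
      (l₁ ++ b :: l₂).find? p = some b := by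
  intro l₁
  induction l₁ with
  | nil => intro _ hb; simp [hb]
  | cons a l ih =>
    intro h1 hb
    have ha := h1 a (by simp)
    simp only [List.cons_append, List.find?_cons, ha]
    exact ih (fun y hy => h1 y (by simp [hy])) hb

-- ===== VERDICT (by name: the statement is the Claim_ definition above) =====
theorem pick_best_subtitle_language_spec : Claim_equal_pick_best_subtitle_language := by
  intro xs _
  unfold Spec_pick_best_subtitle_language
  rcases hf : xs.filter pbsl_keep with _ | ⟨x, t⟩
  · simp [pick_best_subtitle_language, pick_best_subtitle_language_alt, pbsl_fold_filter, hf]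
  · have hxs : xs.isEmpty = false := by
      rcases xs with _ | ⟨a, r⟩
      · simp at hf
      · rfl
    have hB : pick_best_subtitle_language_alt xs = some (pbsl_best x t) := by
      unfold pick_best_subtitle_language_alt
      rw [pbsl_fold_filter, hf, List.foldl_cons]
      have h9 : pbsl_step (none, 9) x = (some x, pbsl_rank x) := by
        unfold pbsl_step
        rw [if_pos (lt_of_le_of_lt (pbsl_rank_le_8 x) (by norm_num))]
      rw [h9, pbsl_fold_best]
    rw [hB]
    obtain ⟨l₁, l₂, hdec, hfirst⟩ := pbsl_best_decomp t x
    have hmin : ∀ y ∈ x :: t, pbsl_rank (pbsl_best x t) ≤ pbsl_rank y := pbsl_best_min t x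
    have hbmem : pbsl_best x t ∈ x :: t := by rw [hdec]; simp
    unfold pick_best_subtitle_language
    simp only [hxs, Bool.false_eq_true, if_false, hf, List.isEmpty_cons]
    rcases pbsl_rank_cases (pbsl_best x t) with
      ⟨hr, hb⟩|⟨hr, hb⟩|⟨hr, hb⟩|⟨hr, hb⟩|⟨hr, hb⟩|⟨hr, hb⟩|⟨hr, hz⟩|⟨hr, hz, he⟩|⟨hr, hz, he⟩
    · have hc0 : (x :: t).contains "zh-Hans" = true := pbsl_mem_contains (hb ▸ hbmem)
      simp only [pbsl_exactLoop, hc0, if_true]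
      simp [hb]
    · have hc0 : (x :: t).contains "zh-Hans" = false := pbsl_not_contains hmin (by rw [hr]; decide)
      have hc1 : (x :: t).contains "zh-CN" = true := pbsl_mem_contains (hb ▸ hbmem)
      simp only [pbsl_exactLoop, hc0, hc1]
      simp [hb]
    · have hc0 : (x :: t).contains "zh-Hans" = false := pbsl_not_contains hmin (by rw [hr]; decide)
      have hc1 : (x :: t).contains "zh-CN" = false := pbsl_not_contains hmin (by rw [hr]; decide)
      have hc2 : (x :: t).contains "zh" = true := pbsl_mem_contains (hb ▸ hbmem)
      simp only [pbsl_exactLoop, hc0, hc1, hc2]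
      simp [hb]
    · have hc0 : (x :: t).contains "zh-Hans" = false := pbsl_not_contains hmin (by rw [hr]; decide)
      have hc1 : (x :: t).contains "zh-CN" = false := pbsl_not_contains hmin (by rw [hr]; decide)
      have hc2 : (x :: t).contains "zh" = false := pbsl_not_contains hmin (by rw [hr]; decide)
      have hc3 : (x :: t).contains "en-US" = true := pbsl_mem_contains (hb ▸ hbmem)
      simp only [pbsl_exactLoop, hc0, hc1, hc2, hc3]
      simp [hb]
    · have hc0 : (x :: t).contains "zh-Hans" = false := pbsl_not_contains hmin (by rw [hr]; decide)
      have hc1 : (x :: t).contains "zh-CN" = false := pbsl_not_contains hmin (by rw [hr]; decide)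
      have hc2 : (x :: t).contains "zh" = false := pbsl_not_contains hmin (by rw [hr]; decide)
      have hc3 : (x :: t).contains "en-US" = false := pbsl_not_contains hmin (by rw [hr]; decide)
      have hc4 : (x :: t).contains "en-GB" = true := pbsl_mem_contains (hb ▸ hbmem)
      simp only [pbsl_exactLoop, hc0, hc1, hc2, hc3, hc4]
      simp [hb]
    · have hc0 : (x :: t).contains "zh-Hans" = false := pbsl_not_contains hmin (by rw [hr]; decide)
      have hc1 : (x :: t).contains "zh-CN" = false := pbsl_not_contains hmin (by rw [hr]; decide)
      have hc2 : (x :: t).contains "zh" = false := pbsl_not_contains hmin (by rw [hr]; decide)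
      have hc3 : (x :: t).contains "en-US" = false := pbsl_not_contains hmin (by rw [hr]; decide)
      have hc4 : (x :: t).contains "en-GB" = false := pbsl_not_contains hmin (by rw [hr]; decide)
      have hc5 : (x :: t).contains "en" = true := pbsl_mem_contains (hb ▸ hbmem)
      simp only [pbsl_exactLoop, hc0, hc1, hc2, hc3, hc4, hc5]
      simp [hb]
    · -- rank 6: first zh-prefixed element
      have hc0 : (x :: t).contains "zh-Hans" = false := pbsl_not_contains hmin (by rw [hr]; decide)
      have hc1 : (x :: t).contains "zh-CN" = false := pbsl_not_contains hmin (by rw [hr]; decide)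
      have hc2 : (x :: t).contains "zh" = false := pbsl_not_contains hmin (by rw [hr]; decide)
      have hc3 : (x :: t).contains "en-US" = false := pbsl_not_contains hmin (by rw [hr]; decide)
      have hc4 : (x :: t).contains "en-GB" = false := pbsl_not_contains hmin (by rw [hr]; decide)
      have hc5 : (x :: t).contains "en" = false := pbsl_not_contains hmin (by rw [hr]; decide)
      have hfz : (x :: t).find? pbsl_zh = some (pbsl_best x t) := by
        rw [hdec]
        refine pbsl_find?_first _ _ _ (fun y hy => ?_) hz
        have := hfirst y hy
        cases hzy : pbsl_zh y with
        | false => rfl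
        | true => exact absurd (pbsl_zh_rank hzy) (by omega)
      simp only [pbsl_exactLoop, hc0, hc1, hc2, hc3, hc4, hc5, hfz]
      simp
    · -- rank 7: no zh, first en-prefixed element
      have hc0 : (x :: t).contains "zh-Hans" = false := pbsl_not_contains hmin (by rw [hr]; decide)
      have hc1 : (x :: t).contains "zh-CN" = false := pbsl_not_contains hmin (by rw [hr]; decide)
      have hc2 : (x :: t).contains "zh" = false := pbsl_not_contains hmin (by rw [hr]; decide)
      have hc3 : (x :: t).contains "en-US" = false := pbsl_not_contains hmin (by rw [hr]; decide)
      have hc4 : (x :: t).contains "en-GB" = false := pbsl_not_contains hmin (by rw [hr]; decide)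
      have hc5 : (x :: t).contains "en" = false := pbsl_not_contains hmin (by rw [hr]; decide)
      have hfz : (x :: t).find? pbsl_zh = none := by
        rw [List.find?_eq_none]
        intro y hy
        have := hmin y hy
        cases hzy : pbsl_zh y with
        | false => simp
        | true => exact absurd (pbsl_zh_rank hzy) (by omega)
      have hfe : (x :: t).find? pbsl_en = some (pbsl_best x t) := by
        rw [hdec]
        refine pbsl_find?_first _ _ _ (fun y hy => ?_) he
        have := hfirst y hy
        cases hey : pbsl_en y with
        | false => rfl
        | true => exact absurd (pbsl_en_rank hey) (by omega)
      simp only [pbsl_exactLoop, hc0, hc1, hc2, hc3, hc4, hc5, hfz, hfe]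
      simp
    · -- rank 8: everything fails, first kept element
      have hc0 : (x :: t).contains "zh-Hans" = false := pbsl_not_contains hmin (by rw [hr]; decide)
      have hc1 : (x :: t).contains "zh-CN" = false := pbsl_not_contains hmin (by rw [hr]; decide)
      have hc2 : (x :: t).contains "zh" = false := pbsl_not_contains hmin (by rw [hr]; decide)
      have hc3 : (x :: t).contains "en-US" = false := pbsl_not_contains hmin (by rw [hr]; decide)
      have hc4 : (x :: t).contains "en-GB" = false := pbsl_not_contains hmin (by rw [hr]; decide)
      have hc5 : (x :: t).contains "en" = false := pbsl_not_contains hmin (by rw [hr]; decide)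
      have hfz : (x :: t).find? pbsl_zh = none := by
        rw [List.find?_eq_none]
        intro y hy
        have := hmin y hy
        cases hzy : pbsl_zh y with
        | false => simp
        | true => exact absurd (pbsl_zh_rank hzy) (by omega)
      have hfe : (x :: t).find? pbsl_en = none := by
        rw [List.find?_eq_none]
        intro y hy
        have := hmin y hy
        cases hey : pbsl_en y with
        | false => simp
        | true => exact absurd (pbsl_en_rank hey) (by omega)
      have hl1 : l₁ = [] := by
        rcases l₁ with _ | ⟨w, l⟩
        · rfl
        · exact absurd (hfirst w (by simp)) (by have := pbsl_rank_le_8 w; omega)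
      have hx : x = pbsl_best x t := by
        rw [hl1, List.nil_append] at hdec
        exact (List.cons.injEq _ _ _ _ ▸ hdec).1
      simp only [pbsl_exactLoop, hc0, hc1, hc2, hc3, hc4, hc5, hfz, hfe]
      simp [PySem.List.pyGet?, PySem.List.pyIdx?, ← hx]
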